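-- pv_equiv track=rewrite | github.com/IsseW/Python-Problem-Losning | Uppgifter/2/2.21.py | matrix_dimensions
-- ===== SOURCE A (Python) =====
-- def matrix_dimensions(matrix):
--     width = len(matrix)
--     if width == 0:
--         return "This is a 0x0 matrix"
--     height = len(matrix[0])
--     for i in range(1, width):
--         if len(matrix[i]) != height:
--             return "This is not a valid matrix."
--     return "This is a " + str(width) + "x" + str(height) + " matrix."
-- ===== SOURCE B (Python) =====
-- def matrix_dimensions(matrix):
--     if not matrix:
--         return "This is a 0x0 matrix"
--     lengths = list(map(len, matrix))
--     lo, hi = min(lengths), max(lengths)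
--     if lo != hi:
--         return "This is not a valid matrix."
--     return "This is a " + str(len(matrix)) + "x" + str(lo) + " matrix."
-- ===== Notes on version B (the rewrite author's own statement) =====
-- stated objective: alternative
-- what changed: Replaces A's early-exit loop comparing each row's length against the first row's with two aggregate reductions (min and max over all row lengths), judging validity by min == max and taking the height from the min instead of from matrix[0].
import Mathlib
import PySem

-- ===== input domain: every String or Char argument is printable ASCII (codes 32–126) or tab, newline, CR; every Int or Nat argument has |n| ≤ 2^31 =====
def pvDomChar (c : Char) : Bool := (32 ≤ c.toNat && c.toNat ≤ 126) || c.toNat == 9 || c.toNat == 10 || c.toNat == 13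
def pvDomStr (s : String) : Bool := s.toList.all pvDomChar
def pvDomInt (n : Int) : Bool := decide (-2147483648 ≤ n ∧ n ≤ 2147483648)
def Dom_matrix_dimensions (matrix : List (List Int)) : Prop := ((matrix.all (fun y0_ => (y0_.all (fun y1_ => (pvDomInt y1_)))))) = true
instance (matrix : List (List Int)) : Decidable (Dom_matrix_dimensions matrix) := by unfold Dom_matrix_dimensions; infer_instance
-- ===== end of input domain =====

-- B replaces A's early-exit compare-to-first-row loop with two aggregate reductions
-- (min and max of all row lengths), valid iff min = max; same cost, alternative algorithm.


-- ===== PORT A =====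
-- the 'for i in range(1, width)' loop with its early return: recursion over the rows after the first
def pvLoopA (height : Int) : List (List Int) → Option String
  | [] => none
  | r :: rs => if ((r.length : Int)) ≠ height then some "This is not a valid matrix." else pvLoopA height rs

def matrix_dimensions (matrix : List (List Int)) : String :=
  let width : Int := matrix.length
  if width = 0 then "This is a 0x0 matrix"
  else
    let height : Int := ((matrix.headD []).length : Int)
    match pvLoopA height matrix.tail with
    | some s => s
    | none => "This is a " ++ PySem.Int.toStr width ++ "x" ++ PySem.Int.toStr height ++ " matrix."

-- ===== PORT B =====
def matrix_dimensions_alt (matrix : List (List Int)) : String :=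
  if matrix.isEmpty then "This is a 0x0 matrix"
  else
    let lengths : List Int := matrix.map (fun row => ((row.length : Int)))
    match PySem.List.min? lengths (fun x => x), PySem.List.max? lengths (fun x => x) with
    | some lo, some hi =>
        if lo ≠ hi then "This is not a valid matrix."
        else "This is a " ++ PySem.Int.toStr (matrix.length : Int) ++ "x" ++ PySem.Int.toStr lo ++ " matrix."
    | _, _ => ""   -- unreachable: the guard makes lengths nonempty (Python min/max raise only on empty)

-- ===== PRECONDITION & SPEC =====
def Spec_matrix_dimensions (matrix : List (List Int)) (out : String) : Prop := out = matrix_dimensions_alt matrix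
instance (matrix : List (List Int)) (out : String) : Decidable (Spec_matrix_dimensions matrix out) := by unfold Spec_matrix_dimensions; infer_instance

-- ===== CLAIM (what is proved, stated in full; the proofs are below) =====
def Claim_equal_matrix_dimensions : Prop := ∀ (matrix : List (List Int)), Dom_matrix_dimensions matrix → Spec_matrix_dimensions matrix (matrix_dimensions matrix)

-- ===== LEMMAS AND PROOFS =====

theorem pvLoopA_none_iff (h : Int) (l : List (List Int)) :
    pvLoopA h l = none ↔ ∀ r ∈ l, ((r.length : Int)) = h := by
  induction l with
  | nil => simp [pvLoopA]
  | cons r rs ih =>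
    simp only [pvLoopA, List.mem_cons]
    split_ifs with hr
    · simp; intro h'; exact absurd h' hr
    · rw [ne_eq, not_not] at hr
      simp [ih, hr]

theorem pvLoopA_some_eq (h : Int) (l : List (List Int)) (s : String)
    (hl : pvLoopA h l = some s) : s = "This is not a valid matrix." := by
  induction l with
  | nil => simp [pvLoopA] at hl
  | cons a as ih =>
    simp only [pvLoopA] at hl
    split_ifs at hl with hcond
    · exact (Option.some.inj hl).symm
    · exact ih hl

-- ===== VERDICT (by name: the statement is the Claim_ definition above) =====
theorem matrix_dimensions_spec : Claim_equal_matrix_dimensions := by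
  intro matrix _
  unfold Spec_matrix_dimensions matrix_dimensions matrix_dimensions_alt
  cases matrix with
  | nil => rfl
  | cons r rs =>
    simp only [List.isEmpty_cons, List.length_cons, List.tail_cons, List.headD_cons,
      Bool.false_eq_true, if_false]
    rw [if_neg (show ¬ (((rs.length + 1 : Nat) : Int) = 0) by push_cast; omega)]
    set lengths : List Int := (r :: rs).map (fun row => ((row.length : Int))) with hlen
    have hne : lengths ≠ [] := by simp [hlen]
    obtain ⟨lo, hlo⟩ : ∃ lo, PySem.List.min? lengths (fun x => x) = some lo := by
      cases hm : PySem.List.min? lengths (fun x => x) with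
      | none => exact absurd (Iff.mp (PySem.List.min?_eq_none_iff lengths (fun x => x)) hm) hne
      | some m => exact ⟨m, rfl⟩
    obtain ⟨hi, hhi⟩ : ∃ hi, PySem.List.max? lengths (fun x => x) = some hi := by
      cases hm : PySem.List.max? lengths (fun x => x) with
      | none => exact absurd (Iff.mp (PySem.List.max?_eq_none_iff lengths (fun x => x)) hm) hne
      | some m => exact ⟨m, rfl⟩
    have hlomem := PySem.List.min?_mem hlo
    have hhimem := PySem.List.max?_mem hhi
    have hlomin := PySem.List.min?_isMin hlo
    have hhimax := PySem.List.max?_isMax hhi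
    have hhead : ((r.length : Int)) ∈ lengths := by simp [hlen]
    rw [hlo, hhi]
    by_cases hall : ∀ r' ∈ rs, ((r'.length : Int)) = ((r.length : Int))
    · -- valid: every length equals the head's, so lo = hi = r.length
      have heq : ∀ y ∈ lengths, y = ((r.length : Int)) := by
        intro y hy
        rcases List.mem_map.mp hy with ⟨r', hr', rfl⟩
        rcases List.mem_cons.mp hr' with h1 | h2
        · rw [h1]
        · exact hall r' h2
      have hloeq : lo = ((r.length : Int)) := heq lo hlomem
      have hhieq : hi = ((r.length : Int)) := heq hi hhimem
      have h1 : pvLoopA ((r.length : Int)) rs = none := (pvLoopA_none_iff _ _).mpr hall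
      simp [h1, hloeq, hhieq]
    · -- invalid: lo ≠ hi, for otherwise all lengths coincide
      have hlohi : lo ≠ hi := by
        intro hcontr
        apply hall
        intro r' hr'
        have hmem : ((r'.length : Int)) ∈ lengths := by simp [hlen]; right; exact ⟨r', hr', rfl⟩
        have h1 := hlomin _ hmem
        have h2 := hhimax _ hmem
        have h3 := hlomin _ hhead
        have h4 := hhimax _ hhead
        simp only at h1 h2 h3 h4
        omega
      have h1 : pvLoopA ((r.length : Int)) rs ≠ none := fun hc =>
        hall ((pvLoopA_none_iff _ _).mp hc)
      cases hl : pvLoopA ((r.length : Int)) rs with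
      | none => exact absurd hl h1
      | some s =>
        have hs : s = "This is not a valid matrix." := pvLoopA_some_eq _ _ _ hl
        simp [hs, hlohi]
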